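-- pv_equiv track=rewrite | github.com/makinbakonpancakes/adventofcode2016 | day9/day9.py | add_til_num
-- ===== SOURCE A (Python) =====
-- def add_til_num(lst, num, reps):
--     add_me = ""
--     for i in range(len(lst)):
--         for j in range(len(lst[i])):
--             if len(add_me) < num:
--                 add_me += lst[i][j]
--                 if len(add_me) == num:
--                     add_me *= reps
--                     add_me += lst[i][j+1:]
--                     new_lst = lst[i+1:]
--                     return (new_lst, add_me)
--     return ([], add_me)
-- ===== SOURCE B (Python) =====
-- def add_til_num(lst, num, reps):
--     # Running length counter locates the element where the num-th char falls;
--     # slicing replaces A's char-by-char accumulation.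
--     if num <= 0:
--         return ([], "")
--     parts = []
--     acc = 0
--     for i, s in enumerate(lst):
--         if acc + len(s) >= num:
--             j = num - acc
--             parts.append(s[:j])
--             prefix = "".join(parts)
--             return (lst[i + 1:], prefix * reps + s[j:])
--         parts.append(s)
--         acc += len(s)
--     return ([], "".join(parts))
-- ===== Notes on version B (the rewrite author's own statement) =====
-- stated objective: alternative
-- what changed: B replaces A's nested char-by-char loop that extends add_me one character at a time with a single pass over whole elements keeping a running length counter, locating the straddling element and cutting it with two slices plus one join.
import Mathlib
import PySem

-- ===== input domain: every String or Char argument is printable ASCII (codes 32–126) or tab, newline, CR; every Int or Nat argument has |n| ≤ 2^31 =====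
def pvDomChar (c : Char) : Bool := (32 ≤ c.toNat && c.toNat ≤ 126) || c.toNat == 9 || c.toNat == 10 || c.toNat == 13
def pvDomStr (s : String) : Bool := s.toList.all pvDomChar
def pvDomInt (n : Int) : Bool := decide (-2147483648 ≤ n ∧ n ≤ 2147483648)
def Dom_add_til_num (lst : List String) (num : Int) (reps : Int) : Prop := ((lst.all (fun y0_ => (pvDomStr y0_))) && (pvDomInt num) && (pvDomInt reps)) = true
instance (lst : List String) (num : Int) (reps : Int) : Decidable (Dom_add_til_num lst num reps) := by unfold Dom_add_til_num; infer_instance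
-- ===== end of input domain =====

-- B replaces A's nested char-by-char accumulation by a single pass with a running length
-- counter, locating the straddling element and cutting it with two slices (objective: alternative).

-- ===== PORT A =====
-- inner loop: for j in range(len(lst[i])): …  — the recursion's tail `rest` IS lst[i][j+1:]
-- (a drop at a nonnegative position, exact), so no separate slice call is needed.
def addA_inner (cs : List Char) (num : Int) (reps : Int) (tail : List String)
    (add_me : List Char) : (List String × String) ⊕ (List Char) :=
  match cs with
  | [] => Sum.inr add_me
  | c :: rest =>
    if (add_me.length : Int) < num then
      let am := add_me ++ [c]                       -- add_me += lst[i][j]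
      if (am.length : Int) = num then
        -- add_me *= reps; add_me += lst[i][j+1:]; return (lst[i+1:], add_me)
        Sum.inl (tail, String.ofList (PySem.List.pyRepeat am reps ++ rest))
      else addA_inner rest num reps tail am
    else addA_inner rest num reps tail add_me

-- outer loop: for i in range(len(lst)) — the tail IS lst[i+1:]
def addA_outer (lst : List String) (num : Int) (reps : Int)
    (add_me : List Char) : List String × String :=
  match lst with
  | [] => ([], String.ofList add_me)
  | s :: tail =>
    match addA_inner s.toList num reps tail add_me with
    | Sum.inl out => out
    | Sum.inr am' => addA_outer tail num reps am'

def add_til_num (lst : List String) (num : Int) (reps : Int) : List String × String :=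
  addA_outer lst num reps []

-- ===== PORT B =====
-- loop of Source B: parts = collected whole elements, acc = running length counter
def addB_loop (lst : List String) (num : Int) (reps : Int)
    (parts : List (List Char)) (acc : Int) : List String × String :=
  match lst with
  | [] => ([], String.ofList (PySem.Chars.join [] parts))            -- "".join(parts)
  | s :: tail =>
    let cs := s.toList
    if acc + (cs.length : Int) ≥ num then
      let j := num - acc
      let pre := PySem.List.slice cs none (some j)                   -- s[:j]
      let prefx := PySem.Chars.join [] (parts ++ [pre])              -- "".join(parts)
      (tail, String.ofList (PySem.List.pyRepeat prefx reps ++ PySem.List.slice cs (some j) none))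
    else addB_loop tail num reps (parts ++ [cs]) (acc + (cs.length : Int))

def add_til_num_alt (lst : List String) (num : Int) (reps : Int) : List String × String :=
  if num ≤ 0 then ([], "") else addB_loop lst num reps [] 0

-- ===== PRECONDITION & SPEC =====
def Spec_add_til_num (lst : List String) (num : Int) (reps : Int) (out : List String × String) : Prop := out = add_til_num_alt lst num reps
instance (lst : List String) (num : Int) (reps : Int) (out : List String × String) : Decidable (Spec_add_til_num lst num reps out) := by unfold Spec_add_til_num; infer_instance

-- ===== CLAIM (what is proved, stated in full; the proofs are below) =====
def Claim_equal_add_til_num : Prop := ∀ (lst : List String) (num : Int) (reps : Int), Dom_add_til_num lst num reps → Spec_add_til_num lst num reps (add_til_num lst num reps)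

-- ===== LEMMAS AND PROOFS =====

theorem join_nil_eq_flatten (parts : List (List Char)) :
    PySem.Chars.join [] parts = parts.flatten := by
  induction parts with
  | nil => rfl
  | cons p ps ih =>
    cases ps with
    | nil => simp [PySem.Chars.join_singleton]
    | cons q qs => rw [PySem.Chars.join_cons_cons] at *; simp [ih]

-- if add_me is already long enough, the inner loop does nothing
theorem addA_inner_stuck (cs : List Char) (num reps : Int) (tail : List String)
    (add_me : List Char) (h : ¬ ((add_me.length : Int) < num)) :
    addA_inner cs num reps tail add_me = Sum.inr add_me := by
  induction cs with
  | nil => simp [addA_inner]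
  | cons c rest ih => simp [addA_inner, h, ih]

-- the string is consumed entirely without reaching num
theorem addA_inner_low (cs : List Char) (num reps : Int) (tail : List String) :
    ∀ add_me : List Char, (add_me.length : Int) + cs.length < num →
    addA_inner cs num reps tail add_me = Sum.inr (add_me ++ cs) := by
  induction cs with
  | nil => intro a h; simp [addA_inner]
  | cons c rest ih =>
    intro a h
    simp only [List.length_cons] at h
    have h1 : (a.length : Int) < num := by push_cast at h ⊢; omega
    have h2 : ¬ (((a ++ [c]).length : Int) = num) := by
      simp only [List.length_append, List.length_singleton]; push_cast at h ⊢; omega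
    simp only [addA_inner, if_pos h1, if_neg h2]
    rw [ih (a ++ [c]) (by simp; push_cast at h ⊢; omega)]
    simp

-- num is reached inside this string
theorem addA_inner_hit (cs : List Char) (num reps : Int) (tail : List String) :
    ∀ add_me : List Char, (add_me.length : Int) < num →
    num ≤ (add_me.length : Int) + cs.length →
    addA_inner cs num reps tail add_me =
      Sum.inl (tail, String.ofList
        (PySem.List.pyRepeat (add_me ++ cs.take (num - add_me.length).toNat) reps
          ++ cs.drop (num - add_me.length).toNat)) := by
  induction cs with
  | nil => intro a h1 h2; simp at h2; omega
  | cons c rest ih =>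
    intro a h1 h2
    simp only [addA_inner, if_pos h1]
    by_cases h3 : (((a ++ [c]).length : Int) = num)
    · have hk : (num - (a.length : Int)).toNat = 1 := by
        simp only [List.length_append, List.length_singleton] at h3; omega
      rw [if_pos h3, hk]
      simp
    · have h1' : ((a ++ [c]).length : Int) < num := by
        simp only [List.length_append, List.length_singleton] at h3 ⊢; push_cast; omega
      have h2' : num ≤ ((a ++ [c]).length : Int) + rest.length := by
        simp only [List.length_append, List.length_singleton]
        simp only [List.length_cons] at h2; push_cast at h2 ⊢; omega
      rw [if_neg h3, ih (a ++ [c]) h1' h2']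
      have hk : (num - (a.length : Int)).toNat = (num - ((a ++ [c]).length : Int)).toNat + 1 := by
        simp only [List.length_append, List.length_singleton]; omega
      rw [hk]
      simp [List.take_succ_cons, List.drop_succ_cons]

-- main loop invariant: A's accumulated string is the flattening of B's parts,
-- B's counter is its length
theorem loop_eq (num reps : Int) :
    ∀ (lst : List String) (parts : List (List Char)),
    ((parts.flatten.length : Int) < num) →
    addA_outer lst num reps parts.flatten
      = addB_loop lst num reps parts (parts.flatten.length : Int) := by
  intro lst
  induction lst with
  | nil =>
    intro parts _
    simp [addA_outer, addB_loop, join_nil_eq_flatten]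
  | cons s tail ih =>
    intro parts hlt
    by_cases hge : (parts.flatten.length : Int) + (s.toList.length : Int) ≥ num
    · have := addA_inner_hit s.toList num reps tail parts.flatten hlt (by omega)
      simp only [addA_outer, this, addB_loop, if_pos hge]
      have hj : (0:Int) ≤ num - (parts.flatten.length : Int) := by omega
      rw [PySem.List.slice_to _ hj, PySem.List.slice_from _ hj, join_nil_eq_flatten]
      simp
    · have hlow := addA_inner_low s.toList num reps tail parts.flatten (by omega)
      simp only [addA_outer, hlow, addB_loop, if_neg hge]
      have hlen : ((parts ++ [s.toList]).flatten.length : Int)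
          = (parts.flatten.length : Int) + (s.toList.length : Int) := by
        simp
      have heq : parts.flatten ++ s.toList = (parts ++ [s.toList]).flatten := by simp
      rw [heq, ih (parts ++ [s.toList]) (by rw [hlen]; omega), hlen]

theorem addA_outer_nonpos (num reps : Int) (hnum : num ≤ 0) :
    ∀ lst : List String, addA_outer lst num reps [] = ([], "") := by
  intro lst
  induction lst with
  | nil => rfl
  | cons s tail ih =>
    have := addA_inner_stuck s.toList num reps tail [] (by simp; omega)
    simp [addA_outer, this, ih]

-- ===== VERDICT (by name: the statement is the Claim_ definition above) =====
theorem add_til_num_spec : Claim_equal_add_til_num := by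
  intro lst num reps _
  unfold Spec_add_til_num add_til_num add_til_num_alt
  by_cases h : num ≤ 0
  · rw [if_pos h, addA_outer_nonpos num reps h]
  · rw [if_neg h]
    have := loop_eq num reps lst [] (by simp; omega)
    simpa using this
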